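-- pv_equiv track=rewrite | github.com/aljinovic-ante/Introduction_to_Programming | Kolokvij Vježbe/2. Kolokvij Zima 2018-19 A.py | dvostruki
-- ===== SOURCE A (Python) =====
-- def dvostruki(string):
--     rez=string[0]
--     samoglasnici="aeiou"
--     for c in string[1:]:
--         if c not in samoglasnici and c != rez[-1]:
--             rez += c
--         elif c in samoglasnici:
--             rez += c
--     return rez
-- ===== SOURCE B (Python) =====
-- def dvostruki(string):
--     out = []
--     i, n = 0, len(string)
--     while i < n:
--         j = i
--         while j < n and string[j] == string[i]:
--             j += 1
--         out.append(string[i:j] if string[i] in "aeiou" else string[i])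
--         i = j
--     return "".join(out)
-- ===== Notes on version B (the rewrite author's own statement) =====
-- stated objective: alternative
-- what changed: B scans the string as maximal runs of equal characters with a two-pointer loop, emitting a whole vowel run or a single copy of a consonant run, instead of A's char-by-char accumulator that compares each character to the last kept one.
import Mathlib
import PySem

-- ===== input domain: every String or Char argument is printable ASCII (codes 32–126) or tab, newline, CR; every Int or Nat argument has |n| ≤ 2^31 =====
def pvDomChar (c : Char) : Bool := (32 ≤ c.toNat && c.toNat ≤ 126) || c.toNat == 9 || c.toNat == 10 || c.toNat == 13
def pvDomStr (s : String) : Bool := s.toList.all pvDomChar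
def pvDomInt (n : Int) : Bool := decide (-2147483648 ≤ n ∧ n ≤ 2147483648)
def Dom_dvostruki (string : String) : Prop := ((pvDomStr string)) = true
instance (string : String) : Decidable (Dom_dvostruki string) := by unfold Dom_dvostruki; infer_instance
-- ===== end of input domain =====

-- B replaces A's char-by-char accumulator (compare to last kept char) with a run-based
-- two-pointer scan: whole vowel runs are emitted, consonant runs collapse to one copy.

-- ===== PORT A =====
-- samoglasnici = "aeiou" (membership of a char in that string, ported as a char list)
def pvVowels : List Char := ['a', 'e', 'i', 'o', 'u']

-- the for-loop over string[1:], carrying rez; rez[-1] is PySem.List.pyGet? rez (-1)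
-- (rez is nonempty throughout the loop, so the none case of rez[-1] is unreachable)
def dvostrukiLoopA (rez : List Char) (rest : List Char) : List Char :=
  match rest with
  | [] => rez
  | c :: cs =>
    let last? := PySem.List.pyGet? rez (-1)
    let rez' :=
      if c ∉ pvVowels ∧ some c ≠ last? then rez ++ [c]
      else if c ∈ pvVowels then rez ++ [c]
      else rez
    dvostrukiLoopA rez' cs

def dvostruki (string : String) : String :=
  match string.toList with
  | [] => ""            -- Python raises IndexError on string[0] here; excluded by Pre_
  | c0 :: rest => String.ofList (dvostrukiLoopA [c0] rest)

-- ===== PORT B =====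
-- Source B: outer while over run starts; the inner while j-scan of the current run is the
-- takeWhile/dropWhile split; pieces are concatenated (the final ''.join).
def dvostrukiRunsB (l : List Char) : List Char :=
  match l with
  | [] => []
  | c :: cs =>
    let run := cs.takeWhile (· = c)
    let rest := cs.dropWhile (· = c)
    (if c ∈ pvVowels then c :: run else [c]) ++ dvostrukiRunsB rest
termination_by l.length
decreasing_by
  have := List.length_dropWhile_le (fun x => decide (x = c)) cs
  simp at this ⊢; omega

def dvostruki_alt (string : String) : String :=
  String.ofList (dvostrukiRunsB string.toList)

-- ===== PRECONDITION & SPEC =====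
-- A evaluates string[0] first, so it raises IndexError on the empty string; Pre_ excludes exactly that.
def Pre_dvostruki (string : String) : Prop := string ≠ ""
instance (string : String) : Decidable (Pre_dvostruki string) := by unfold Pre_dvostruki; infer_instance
def pvWitness_dvostruki : String := "ennui!!"

def Spec_dvostruki (string : String) (out : String) : Prop := out = dvostruki_alt string
instance (string : String) (out : String) : Decidable (Spec_dvostruki string out) := by unfold Spec_dvostruki; infer_instance

-- ===== CLAIM (what is proved, stated in full; the proofs are below) =====
def Claim_equal_dvostruki : Prop := ∀ (string : String), Dom_dvostruki string → Pre_dvostruki string → Spec_dvostruki string (dvostruki string)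

-- ===== LEMMAS AND PROOFS =====

-- reference function: character-by-character, keep c iff it is a vowel or differs from
-- the previous input character
def pvF (last : Char) : List Char → List Char
  | [] => []
  | c :: cs => (if c ∈ pvVowels then [c] else if c ≠ last then [c] else []) ++ pvF c cs

theorem loopA_eq_pvF : ∀ (rest rez : List Char) (last : Char),
    rez.getLast? = some last → dvostrukiLoopA rez rest = rez ++ pvF last rest := by
  intro rest
  induction rest with
  | nil => intro rez last _; simp [dvostrukiLoopA, pvF]
  | cons c cs ih =>
    intro rez last hlast
    have hget : PySem.List.pyGet? rez (-1) = some last := by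
      rw [PySem.List.pyGet?_neg_one, hlast]
    by_cases hv : c ∈ pvVowels
    · have : dvostrukiLoopA rez (c :: cs) = dvostrukiLoopA (rez ++ [c]) cs := by
        simp only [dvostrukiLoopA, hget]
        split_ifs with h1 <;> simp [hv] at *
      rw [this, ih (rez ++ [c]) c (by simp)]
      simp [pvF, hv]
    · by_cases he : c = last
      · have : dvostrukiLoopA rez (c :: cs) = dvostrukiLoopA rez cs := by
          simp only [dvostrukiLoopA, hget]
          split_ifs with h1 <;> simp_all
        rw [this, ih rez last hlast]
        subst he; simp [pvF, hv]
      · have : dvostrukiLoopA rez (c :: cs) = dvostrukiLoopA (rez ++ [c]) cs := by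
          simp only [dvostrukiLoopA, hget]
          split_ifs with h1 <;> simp_all
        rw [this, ih (rez ++ [c]) c (by simp)]
        simp [pvF, hv, he]

-- pvF swallows a run of characters equal to its 'last' argument unless they are vowels
theorem pvF_run : ∀ (run rest : List Char) (c : Char), (∀ x ∈ run, x = c) →
    pvF c (run ++ rest) = (if c ∈ pvVowels then run else []) ++ pvF c rest := by
  intro run
  induction run with
  | nil => intro rest c _; simp
  | cons x run' ih =>
    intro rest c hall
    have hx : x = c := hall x (by simp)
    subst hx
    have h' : ∀ y ∈ run', y = x := fun y hy => hall y (by simp [hy])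
    by_cases hv : x ∈ pvVowels <;> simp [pvF, hv, ih rest x h']

theorem dropWhile_head_ne : ∀ (l : List Char) (c d : Char) (ds : List Char),
    l.dropWhile (· = c) = d :: ds → d ≠ c := by
  intro l
  induction l with
  | nil => intro c d ds h; simp [List.dropWhile] at h
  | cons x xs ih =>
    intro c d ds h
    by_cases hx : x = c
    · rw [List.dropWhile_cons_of_pos (by simp [hx])] at h
      exact ih c d ds h
    · rw [List.dropWhile_cons_of_neg (by simp [hx])] at h
      cases h; exact hx

def pvG : List Char → List Char
  | [] => []
  | c :: cs => c :: pvF c cs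

theorem pvF_cons_ne (c d : Char) (ds : List Char) (h : d ≠ c) :
    pvF c (d :: ds) = d :: pvF d ds := by
  by_cases hv : d ∈ pvVowels <;> simp [pvF, hv, h]

theorem runsB_eq_pvG : ∀ (l : List Char), dvostrukiRunsB l = pvG l := by
  intro l
  induction l using dvostrukiRunsB.induct with
  | case1 => rw [dvostrukiRunsB]; rfl
  | case2 c cs rest ih =>
    rw [show rest = cs.dropWhile (· = c) from rfl] at ih
    have hsplit : cs = cs.takeWhile (· = c) ++ cs.dropWhile (· = c) :=
      (List.takeWhile_append_dropWhile).symm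
    have hall : ∀ x ∈ cs.takeWhile (· = c), x = c := fun x hx => by
      simpa using List.mem_takeWhile_imp hx
    have hF : pvF c cs =
        (if c ∈ pvVowels then cs.takeWhile (· = c) else []) ++ pvF c (cs.dropWhile (· = c)) := by
      conv_lhs => rw [hsplit]
      exact pvF_run _ _ c hall
    have hB : dvostrukiRunsB (c :: cs) =
        (if c ∈ pvVowels then c :: cs.takeWhile (· = c) else [c]) ++
          dvostrukiRunsB (cs.dropWhile (· = c)) := by
      rw [dvostrukiRunsB]
    rw [hB, ih]
    show _ = c :: pvF c cs
    rw [hF]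
    cases hrest : cs.dropWhile (· = c) with
    | nil =>
      by_cases hv : c ∈ pvVowels
      · simp only [pvG, pvF, if_pos hv, List.append_nil]
      · simp only [pvG, pvF, if_neg hv, List.append_nil]
    | cons d ds =>
      have hdc : d ≠ c := dropWhile_head_ne cs c d ds hrest
      rw [pvF_cons_ne c d ds hdc]
      by_cases hv : c ∈ pvVowels
      · simp only [pvG, if_pos hv, List.cons_append]
      · simp only [pvG, if_neg hv, List.singleton_append, List.nil_append]

-- ===== VERDICT (by name: the statement is the Claim_ definition above) =====
theorem dvostruki_spec : Claim_equal_dvostruki := by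
  intro s _ hpre
  unfold Spec_dvostruki dvostruki dvostruki_alt
  have hne : s.toList ≠ [] := by
    intro h
    exact hpre (String.toList_inj.mp h)
  cases h : s.toList with
  | nil => exact absurd h hne
  | cons c0 rest =>
    show String.ofList (dvostrukiLoopA [c0] rest) = String.ofList (dvostrukiRunsB (c0 :: rest))
    rw [runsB_eq_pvG, loopA_eq_pvF rest [c0] c0 (by simp)]
    simp [pvG]
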